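-- pv_equiv track=rewrite | github.com/siegleal/PyAviationWeather | AviationWeatherLib.py | prettyPrintTaf
-- ===== SOURCE A (Python) =====
-- def prettyPrintTaf(tafString):
--     ''' Parses a multi-line TAF string to print in a human-readable format'''
--     splittaf = tafString.split()
--     index = 0
--     newlist = []
--     result = ['']
--     while (index < len(splittaf) - 1):
--         newlist.append(splittaf[index])
--         if (splittaf[index + 1] == 'TEMPO' or splittaf[index + 1][:2] == 'FM'):
--             result.append(' '.join(newlist))
--             newlist = []
--         index = index + 1
--     result.append(' '.join(newlist))
--     return result
-- ===== SOURCE B (Python) =====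
-- def prettyPrintTaf(tafString):
--     ''' Parses a multi-line TAF string to print in a human-readable format'''
--     tokens = tafString.split()
--     n = len(tokens)
--     body = tokens[:n - 1]
--     cuts = [k for k in range(1, n) if tokens[k] == 'TEMPO' or tokens[k][:2] == 'FM']
--     result = ['']
--     prev = 0
--     for k in cuts:
--         result.append(' '.join(body[prev:k]))
--         prev = k
--     result.append(' '.join(body[prev:]))
--     return result
-- ===== Notes on version B (the rewrite author's own statement) =====
-- stated objective: alternative
-- what changed: A's single lookahead-and-flush pass with a mutable current-group buffer is replaced by first computing the list of cut indices (tokens that start a new group) and then emitting each group as a join of a slice of the body between consecutive cuts.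
import Mathlib
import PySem

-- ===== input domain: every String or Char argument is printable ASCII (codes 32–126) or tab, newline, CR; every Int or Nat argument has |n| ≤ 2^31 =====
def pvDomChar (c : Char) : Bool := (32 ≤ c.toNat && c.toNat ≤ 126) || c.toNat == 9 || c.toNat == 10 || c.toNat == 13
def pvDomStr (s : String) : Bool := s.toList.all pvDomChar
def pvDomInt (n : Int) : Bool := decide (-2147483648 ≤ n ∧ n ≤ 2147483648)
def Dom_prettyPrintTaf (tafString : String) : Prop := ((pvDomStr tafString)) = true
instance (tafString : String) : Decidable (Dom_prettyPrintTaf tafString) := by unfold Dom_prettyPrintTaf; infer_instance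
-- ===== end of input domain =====

-- B replaces A's single lookahead-and-flush pass by a table of cut indices plus a slicing pass (objective: alternative decomposition; same cost).

-- ===== PORT A =====
-- A's while loop; index stays ≥ 0 so it is a Nat, the loop guard is Python's Int comparison.
def prettyPrintTafLoop (splittaf : List String) (index : Nat)
    (newlist result : List String) : List String :=
  if h : (index : Int) < (splittaf.length : Int) - 1 then
    let newlist' := newlist ++ [PySem.List.pyGetD splittaf (index : Int) ""]
    if PySem.List.pyGetD splittaf ((index : Int) + 1) "" == "TEMPO" ||
       PySem.Str.slice (PySem.List.pyGetD splittaf ((index : Int) + 1) "") none (some 2) == "FM" then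
      prettyPrintTafLoop splittaf (index + 1) [] (result ++ [PySem.Str.join " " newlist'])
    else
      prettyPrintTafLoop splittaf (index + 1) newlist' result
  else
    result ++ [PySem.Str.join " " newlist]
termination_by splittaf.length - index
decreasing_by all_goals omega

def prettyPrintTaf (tafString : String) : List String :=
  prettyPrintTafLoop (PySem.Str.split₀ tafString) 0 [] [""]

-- ===== PORT B =====
def prettyPrintTaf_alt (tafString : String) : List String :=
  let tokens := PySem.Str.split₀ tafString
  let n : Int := tokens.length
  let body := PySem.List.slice tokens none (some (n - 1))
  let cuts := (PySem.List.pyRange 1 n).filter (fun k =>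
    PySem.List.pyGetD tokens k "" == "TEMPO" ||
    PySem.Str.slice (PySem.List.pyGetD tokens k "") none (some 2) == "FM")
  let fin := cuts.foldl
    (fun (st : List String × Int) k =>
      (st.1 ++ [PySem.Str.join " " (PySem.List.slice body (some st.2) (some k))], k))
    ([""], 0)
  fin.1 ++ [PySem.Str.join " " (PySem.List.slice body (some fin.2) none)]

-- ===== PRECONDITION & SPEC =====
def Spec_prettyPrintTaf (tafString : String) (out : List String) : Prop := out = prettyPrintTaf_alt tafString
instance (tafString : String) (out : List String) : Decidable (Spec_prettyPrintTaf tafString out) := by unfold Spec_prettyPrintTaf; infer_instance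

-- ===== CLAIM (what is proved, stated in full; the proofs are below) =====
def Claim_equal_prettyPrintTaf : Prop := ∀ (tafString : String), Dom_prettyPrintTaf tafString → Spec_prettyPrintTaf tafString (prettyPrintTaf tafString)

-- ===== LEMMAS AND PROOFS =====

-- the boundary test both programs apply to a token
def pvIsB (t : String) : Bool :=
  t == "TEMPO" || PySem.Str.slice t none (some 2) == "FM"

-- ts with its final token dropped (Python tokens[:n-1])
def pvBody (ts : List String) : List String := ts.take (ts.length - 1)

-- boundary positions of ts lying in [j, ts.length)
def pvCutsFrom (ts : List String) (j : Nat) : List Nat :=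
  (List.range' j (ts.length - j)).filter (fun k => pvIsB (ts.getD k ""))

-- the grouped lines determined by a start index and a list of cut positions
def pvChunks (body : List String) : Nat → List Nat → List String
  | p, [] => [PySem.Str.join " " (body.drop p)]
  | p, k :: ks => PySem.Str.join " " ((body.drop p).take (k - p)) :: pvChunks body k ks

theorem pvMain (ts : List String) :
    ∀ m i p r, ts.length - i = m → p ≤ i →
      prettyPrintTafLoop ts i (((pvBody ts).drop p).take (i - p)) r =
        r ++ pvChunks (pvBody ts) p (pvCutsFrom ts (i + 1)) := by
  intro m
  induction m with
  | zero =>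
    intro i p r hm hpi
    have hi : ts.length ≤ i := by omega
    rw [prettyPrintTafLoop]
    rw [dif_neg (by omega)]
    have hb : (pvBody ts).length = ts.length - 1 := by
      simp [pvBody]
    have htake : (((pvBody ts).drop p).take (i - p)) = (pvBody ts).drop p := by
      apply List.take_of_length_le
      simp [hb]; omega
    have hcuts : pvCutsFrom ts (i + 1) = [] := by
      unfold pvCutsFrom
      have : ts.length - (i + 1) = 0 := by omega
      simp [this]
    rw [htake, hcuts, pvChunks]
  | succ m ih =>
    intro i p r hm hpi
    by_cases hlt : (i : Int) < (ts.length : Int) - 1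
    · have hiN : i + 1 < ts.length := by omega
      rw [prettyPrintTafLoop, dif_pos hlt]
      have hget : PySem.List.pyGetD ts (i : Int) "" = ts.getD i "" :=
        PySem.List.pyGetD_natCast ts i ""
      have hget1 : PySem.List.pyGetD ts ((i : Int) + 1) "" = ts.getD (i + 1) "" := by
        have : ((i : Int) + 1) = ((i + 1 : Nat) : Int) := by push_cast; ring
        rw [this, PySem.List.pyGetD_natCast]
      -- the appended token extends the accumulated slice by one
      have hib : i < (pvBody ts).length := by simp [pvBody]; omega
      have hstep : (((pvBody ts).drop p).take (i - p)) ++ [PySem.List.pyGetD ts (i : Int) ""]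
          = ((pvBody ts).drop p).take (i + 1 - p) := by
        rw [hget]
        have h2 : ((pvBody ts).drop p)[i - p]? = some ((pvBody ts)[i]'hib) := by
          rw [List.getElem?_drop]
          have hpi' : p + (i - p) = i := by omega
          rw [hpi', List.getElem?_eq_getElem hib]
        have h3 : ts.getD i "" = (pvBody ts)[i]'hib := by
          rw [List.getD_eq_getElem?_getD, List.getElem?_eq_getElem (by omega : i < ts.length)]
          simp [pvBody, List.getElem_take]
        rw [show i + 1 - p = (i - p) + 1 by omega, List.take_add_one, h2, h3]
        simp
      -- the cut list from i+1 starts with i+1 or not, by the boundary test there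
      have hrange : List.range' (i + 1) (ts.length - (i + 1)) =
          (i + 1) :: List.range' (i + 2) (ts.length - (i + 2)) := by
        have : ts.length - (i + 1) = (ts.length - (i + 2)) + 1 := by omega
        rw [this, List.range'_succ]
      by_cases hB : pvIsB (ts.getD (i + 1) "") = true
      · have hcuts : pvCutsFrom ts (i + 1) = (i + 1) :: pvCutsFrom ts (i + 2) := by
          unfold pvCutsFrom
          rw [hrange, List.filter_cons, if_pos hB]
        rw [if_pos (by rw [hget1]; exact hB), hstep]
        have hrec := ih (i + 1) (i + 1) (r ++ [PySem.Str.join " " (((pvBody ts).drop p).take (i + 1 - p))]) (by omega) le_rfl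
        simp only [Nat.sub_self, List.take_zero] at hrec
        rw [hrec, hcuts, pvChunks]
        simp
      · have hcuts : pvCutsFrom ts (i + 1) = pvCutsFrom ts (i + 2) := by
          unfold pvCutsFrom
          rw [hrange, List.filter_cons, if_neg hB]
        rw [if_neg (by rw [hget1]; exact hB), hstep]
        have hrec := ih (i + 1) p r (by omega) (by omega)
        rw [hrec, hcuts]
    · -- loop exits immediately
      rw [prettyPrintTafLoop, dif_neg hlt]
      have htake : (((pvBody ts).drop p).take (i - p)) = (pvBody ts).drop p := by
        apply List.take_of_length_le
        simp [pvBody]; omega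
      have hcuts : pvCutsFrom ts (i + 1) = [] := by
        unfold pvCutsFrom
        have : ts.length - (i + 1) = 0 := by omega
        simp [this]
      rw [htake, hcuts, pvChunks]

theorem pvBFold (body : List String) :
    ∀ (ks : List Nat) (p : Nat) (r : List String),
      ((ks.map (fun k : Nat => (k : Int))).foldl
        (fun (st : List String × Int) k =>
          (st.1 ++ [PySem.Str.join " " (PySem.List.slice body (some st.2) (some k))], k))
        (r, (p : Int))).1 ++
      [PySem.Str.join " " (PySem.List.slice body
        (some ((ks.map (fun k : Nat => (k : Int))).foldl
          (fun (st : List String × Int) k =>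
            (st.1 ++ [PySem.Str.join " " (PySem.List.slice body (some st.2) (some k))], k))
          (r, (p : Int))).2) none)] =
      r ++ pvChunks body p ks := by
  intro ks
  induction ks with
  | nil =>
    intro p r
    simp [pvChunks, PySem.List.slice_from body (by positivity : (0:Int) ≤ (p:Nat))]
  | cons k ks ih =>
    intro p r
    simp only [List.map_cons, List.foldl_cons]
    rw [PySem.List.slice_natCast]
    have hrec := ih k (r ++ [PySem.Str.join " " (List.take (k - p) (List.drop p body))])
    rw [hrec, pvChunks]
    simp [List.take_drop]

-- the range and filtered predicate of B's cut list are pvCutsFrom mapped to Int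
theorem pvCutsCast (ts : List String) :
    ((PySem.List.pyRange 1 (ts.length : Int)).filter (fun k =>
      PySem.List.pyGetD ts k "" == "TEMPO" ||
      PySem.Str.slice (PySem.List.pyGetD ts k "") none (some 2) == "FM")) =
    (pvCutsFrom ts 1).map (fun k : Nat => (k : Int)) := by
  have hrange : ∀ (len a : Nat), PySem.List.pyRange (a : Int) ((a + len : Nat) : Int) =
      (List.range' a len).map (fun k : Nat => (k : Int)) := by
    intro len
    induction len with
    | zero => intro a; simp [PySem.List.pyRange]
    | succ len ih =>
      intro a
      rw [PySem.List.pyRange_one_cons (by push_cast; omega)]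
      have h1 : ((a : Int) + 1) = ((a + 1 : Nat) : Int) := by push_cast; ring
      have h2 : ((a + (len + 1) : Nat) : Int) = ((a + 1) + len : Nat) := by push_cast; ring
      rw [h1, h2, ih (a + 1)]
      rw [List.range'_succ]
      simp
  unfold pvCutsFrom
  cases hn : ts.length with
  | zero => simp [hn, PySem.List.pyRange]
  | succ n' =>
    have h0 : ((n' + 1 : Nat) : Int) = ((1 + n' : Nat) : Int) := by push_cast; ring
    have hpy : PySem.List.pyRange (1 : Int) ((n' + 1 : Nat) : Int) =
        (List.range' 1 n').map (fun k : Nat => (k : Int)) := by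
      rw [h0]
      exact_mod_cast hrange n' 1
    rw [hpy, List.filter_map]
    simp only [Nat.add_sub_cancel]
    congr 1
    apply List.filter_congr
    intro k _
    simp [Function.comp, PySem.List.pyGetD_natCast, pvIsB]

-- B's body slice is pvBody
theorem pvBodyCast (ts : List String) :
    PySem.List.slice ts none (some ((ts.length : Int) - 1)) = pvBody ts := by
  cases hn : ts.length with
  | zero =>
    have : ts = [] := List.eq_nil_of_length_eq_zero hn
    subst this; rfl
  | succ n' =>
    have h : (((n' + 1 : Nat) : Int) - 1) = ((n' : Nat) : Int) := by push_cast; ring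
    rw [h, PySem.List.slice_to ts (by positivity)]
    simp [pvBody, hn]

-- ===== VERDICT (by name: the statement is the Claim_ definition above) =====
theorem prettyPrintTaf_spec : Claim_equal_prettyPrintTaf := by
  intro tafString _
  unfold Spec_prettyPrintTaf prettyPrintTaf prettyPrintTaf_alt
  set ts := PySem.Str.split₀ tafString with hts
  simp only
  rw [pvBodyCast, pvCutsCast]
  have hB := pvBFold (pvBody ts) (pvCutsFrom ts 1) 0 [""]
  norm_num at hB
  rw [hB]
  have hA := pvMain ts (ts.length) 0 0 [""] (by omega) le_rfl
  simpa using hA
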